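-- pv_equiv track=rewrite | github.com/RikvanToor/aoc2022 | days/day14.py | create_rock_set
-- ===== SOURCE A (Python) =====
-- from itertools import pairwise
--
-- def create_rock_set(input):
--   res = set()
--   lowest_point = 0
--   for p in input:
--     for ((x1,y1),(x2,y2)) in pairwise(p):
--       for x in range(min(x1,x2), max(x1,x2)+1):
--         for y in range(min(y1,y2), max(y1,y2)+1):
--           res.add((x,y))
--           if y > lowest_point:
--             lowest_point = y
--   return res, lowest_point
-- ===== SOURCE B (Python) =====
-- from itertools import pairwise
--
-- def create_rock_set(input):
--   # Flatten paths into the list of pairwise segments once; the lowest point is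
--   # computed from segment ENDPOINTS alone (a segment's deepest cell is
--   # max(y1, y2)), and each segment's bounding rectangle is rasterized with a
--   # single linear-index loop (k // h, k % h) instead of nested x/y loops.
--   segments = [seg for p in input for seg in pairwise(p)]
--   lowest_point = max([0] + [max(y1, y2) for (_, y1), (_, y2) in segments])
--   res = set()
--   for (x1, y1), (x2, y2) in segments:
--     xmin, ymin = min(x1, x2), min(y1, y2)
--     h = abs(y1 - y2) + 1
--     n = (abs(x1 - x2) + 1) * h
--     for k in range(n):
--       res.add((xmin + k // h, ymin + k % h))
--   return res, lowest_point
-- ===== Notes on version B (the rewrite author's own statement) =====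
-- stated objective: alternative
-- what changed: B flattens the paths into an explicit segment list, computes lowest_point in closed form from segment endpoints alone (max(y1,y2) per segment, floored at 0) instead of testing every rasterized point, and rasterizes each segment's bounding rectangle with a single linear-index loop using k // h and k % h instead of nested x/y loops.
import Mathlib
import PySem

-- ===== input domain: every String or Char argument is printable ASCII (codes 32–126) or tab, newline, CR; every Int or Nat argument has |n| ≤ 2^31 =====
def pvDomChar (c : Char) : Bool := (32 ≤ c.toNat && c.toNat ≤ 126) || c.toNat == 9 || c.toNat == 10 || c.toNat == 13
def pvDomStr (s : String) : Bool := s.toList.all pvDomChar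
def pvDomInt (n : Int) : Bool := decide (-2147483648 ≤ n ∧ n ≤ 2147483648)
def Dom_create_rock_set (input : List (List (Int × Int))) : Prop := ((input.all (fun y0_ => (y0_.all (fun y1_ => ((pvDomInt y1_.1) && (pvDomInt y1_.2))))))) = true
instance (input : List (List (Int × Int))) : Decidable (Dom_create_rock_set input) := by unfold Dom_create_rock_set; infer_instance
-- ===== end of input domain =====

-- B flattens the paths into a segment list once, derives lowest_point from segment
-- ENDPOINTS in closed form (no per-point max), and rasterizes each segment's
-- rectangle with one linear-index loop (k // h, k % h) instead of nested x/y loops.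

-- ===== PORT A =====
-- Faithful nested loops carrying the pair state (res, lowest_point).
def create_rock_set (input : List (List (Int × Int))) : (List (Int × Int)) × Int :=
  input.foldl (fun st p =>
    (p.zip p.tail).foldl (fun st seg =>
      (PySem.List.pyRange (min seg.1.1 seg.2.1) (max seg.1.1 seg.2.1 + 1) 1).foldl (fun st x =>
        (PySem.List.pyRange (min seg.1.2 seg.2.2) (max seg.1.2 seg.2.2 + 1) 1).foldl (fun st y =>
          (PySem.Set.add st.1 (x, y), if y > st.2 then y else st.2)) st) st) st)
    ((PySem.Set.empty : PySem.Set (Int × Int)), 0)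

-- ===== PORT B =====
def create_rock_set_alt (input : List (List (Int × Int))) : (List (Int × Int)) × Int :=
  let segments := input.flatMap (fun p => p.zip p.tail)
  -- max([0] + [max(y1, y2) for seg in segments])
  let lowest_point :=
    (PySem.List.max? ((0 : Int) :: segments.map (fun s => max s.1.2 s.2.2)) (fun y => y)).getD 0
  let res := segments.foldl (fun r s =>
    let xmin := min s.1.1 s.2.1
    let ymin := min s.1.2 s.2.2
    let h := |s.1.2 - s.2.2| + 1
    let n := (|s.1.1 - s.2.1| + 1) * h
    (PySem.List.pyRange 0 n 1).foldl (fun r k =>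
      PySem.Set.add r (xmin + PySem.Int.floordiv k h, ymin + PySem.Int.mod k h)) r)
    (PySem.Set.empty : PySem.Set (Int × Int))
  (res, lowest_point)

-- ===== PRECONDITION & SPEC =====
def Spec_create_rock_set (input : List (List (Int × Int))) (out : (List (Int × Int)) × Int) : Prop := out = create_rock_set_alt input
instance (input : List (List (Int × Int))) (out : (List (Int × Int)) × Int) : Decidable (Spec_create_rock_set input out) := by unfold Spec_create_rock_set; infer_instance

-- ===== CLAIM (what is proved, stated in full; the proofs are below) =====
def Claim_equal_create_rock_set : Prop := ∀ (input : List (List (Int × Int))), Dom_create_rock_set input → Spec_create_rock_set input (create_rock_set input)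

-- ===== LEMMAS AND PROOFS =====

-- the points of one segment in A's visit order (x-major, y increasing)
def pvSegA (s : (Int × Int) × (Int × Int)) : List (Int × Int) :=
  (PySem.List.pyRange (min s.1.1 s.2.1) (max s.1.1 s.2.1 + 1) 1).flatMap (fun x =>
    (PySem.List.pyRange (min s.1.2 s.2.2) (max s.1.2 s.2.2 + 1) 1).map (fun y => (x, y)))

-- the points of one segment in B's visit order (linear index)
def pvSegB (s : (Int × Int) × (Int × Int)) : List (Int × Int) :=
  (PySem.List.pyRange 0 ((|s.1.1 - s.2.1| + 1) * (|s.1.2 - s.2.2| + 1)) 1).map (fun k =>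
    (min s.1.1 s.2.1 + PySem.Int.floordiv k (|s.1.2 - s.2.2| + 1),
     min s.1.2 s.2.2 + PySem.Int.mod k (|s.1.2 - s.2.2| + 1)))

-- generic: linear-index enumeration of an (m+1) × (h+1) grid is the nested enumeration
theorem rect_lin {α : Type} (f : Nat → Nat → α) (m h : Nat) :
    (List.range ((m + 1) * (h + 1))).map (fun k => f (k / (h + 1)) (k % (h + 1)))
      = (List.range (m + 1)).flatMap (fun i => (List.range (h + 1)).map (fun j => f i j)) := by
  induction m with
  | zero =>
      have h1 : List.range (0 + 1) = [0] := rfl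
      rw [show (0 + 1) * (h + 1) = h + 1 by ring, h1, List.flatMap_cons, List.flatMap_nil,
        List.append_nil]
      refine List.map_congr_left (fun k hk => ?_)
      have hk' := List.mem_range.mp hk
      rw [Nat.div_eq_of_lt hk', Nat.mod_eq_of_lt hk']
  | succ m ih =>
      have hsplit : (m + 1 + 1) * (h + 1) = (m + 1) * (h + 1) + (h + 1) := by ring
      have hr : List.range (m + 1 + 1) = List.range (m + 1) ++ [m + 1] := List.range_succ
      rw [hsplit, List.range_add, List.map_append, ih, hr, List.flatMap_append,
        List.flatMap_cons, List.flatMap_nil, List.append_nil]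
      congr 1
      rw [List.map_map]
      refine List.map_congr_left (fun j hj => ?_)
      have hj' := List.mem_range.mp hj
      have hdiv : ((m + 1) * (h + 1) + j) / (h + 1) = m + 1 := by
        rw [Nat.add_comm, Nat.mul_comm, Nat.add_mul_div_left _ _ (Nat.succ_pos h),
          Nat.div_eq_of_lt hj', Nat.zero_add]
      have hmod : ((m + 1) * (h + 1) + j) % (h + 1) = j := by
        rw [Nat.add_comm, Nat.mul_comm, Nat.add_mul_mod_self_left, Nat.mod_eq_of_lt hj']
      simp [Function.comp, hdiv, hmod]

-- B's linear enumeration of a segment equals A's nested one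
theorem segB_eq_segA (s : (Int × Int) × (Int × Int)) : pvSegB s = pvSegA s := by
  obtain ⟨⟨x1, y1⟩, ⟨x2, y2⟩⟩ := s
  set m : Nat := (x1 - x2).natAbs with hm
  set h : Nat := (y1 - y2).natAbs with hh
  have habsx : |x1 - x2| = (m : Int) := Int.abs_eq_natAbs _
  have habsy : |y1 - y2| = (h : Int) := Int.abs_eq_natAbs _
  have hxmax : max x1 x2 + 1 = min x1 x2 + ((m + 1 : Nat) : Int) := by push_cast; omega
  have hymax : max y1 y2 + 1 = min y1 y2 + ((h + 1 : Nat) : Int) := by push_cast; omega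
  unfold pvSegB pvSegA
  simp only [habsx, habsy, hxmax, hymax]
  have hn : ((m : Int) + 1) * ((h : Int) + 1) = (((m + 1) * (h + 1) : Nat) : Int) := by
    push_cast; ring
  rw [hn, PySem.List.pyRange_one 0, PySem.List.pyRange_one (min x1 x2),
    PySem.List.pyRange_one (min y1 y2)]
  simp only [add_sub_cancel_left, Int.sub_zero, Int.toNat_natCast, List.map_map]
  have hmapped :
      (List.range ((m + 1) * (h + 1))).map
        ((fun k => (min x1 x2 + PySem.Int.floordiv k ((h : Int) + 1),
                    min y1 y2 + PySem.Int.mod k ((h : Int) + 1))) ∘ fun k : Nat => (0 : Int) + (k : Int))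
      = (List.range ((m + 1) * (h + 1))).map
          (fun k => ((fun i j : Nat => (min x1 x2 + (i : Int), min y1 y2 + (j : Int)))
            (k / (h + 1)) (k % (h + 1)))) := by
    refine List.map_congr_left (fun k _ => ?_)
    have hb : (h : Int) + 1 = ((h + 1 : Nat) : Int) := by push_cast; ring
    simp only [Function.comp, Int.zero_add, hb, PySem.Int.floordiv_natCast, PySem.Int.mod_natCast]
  rw [hmapped]
  refine (rect_lin (fun i j : Nat => (min x1 x2 + (i : Int), min y1 y2 + (j : Int))) m h).trans ?_
  simp [List.flatMap_map, Function.comp_def]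

-- the flat list of all rasterized points, in A's visit order
def pvPts (input : List (List (Int × Int))) : List (Int × Int) :=
  (input.flatMap (fun p => p.zip p.tail)).flatMap pvSegA

-- A's nested loops are one fold over pvPts
theorem create_rock_set_eq_foldl_pts (input : List (List (Int × Int))) :
    create_rock_set input =
      (pvPts input).foldl
        (fun st q => (PySem.Set.add st.1 q, if q.2 > st.2 then q.2 else st.2))
        ((PySem.Set.empty : PySem.Set (Int × Int)), 0) := by
  simp [create_rock_set, pvPts, pvSegA, List.foldl_flatMap, List.foldl_map]

-- the paired fold splits into a set fold and a running-max fold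
theorem foldl_pair_split (L : List (Int × Int)) (s : PySem.Set (Int × Int)) (c : Int) :
    L.foldl (fun st q => (PySem.Set.add st.1 q, if q.2 > st.2 then q.2 else st.2)) (s, c) =
      (L.foldl PySem.Set.add s, L.foldl (fun a q => max a q.2) c) := by
  have hf : (fun (st : PySem.Set (Int × Int) × Int) (q : Int × Int) =>
      (PySem.Set.add st.1 q, if q.2 > st.2 then q.2 else st.2)) =
      (fun st q => (PySem.Set.add st.1 q, max st.2 q.2)) := by
    funext st q
    simp only [Prod.mk.injEq, max_def, true_and]
    split_ifs <;> omega
  rw [hf]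
  induction L generalizing s c with
  | nil => rfl
  | cons q t ih => simp only [List.foldl_cons, ih]

-- running max over an increasing integer range
theorem foldl_max_range (b : Int) (h : Nat) (c : Int) :
    (PySem.List.pyRange b (b + h + 1) 1).foldl max c = max c (b + h) := by
  induction h generalizing c with
  | zero =>
      rw [show b + ((0 : Nat) : Int) + 1 = b + 1 by push_cast; ring,
        PySem.List.pyRange_one_singleton]
      simp
  | succ h ih =>
      have hle : b ≤ b + (h : Int) + 1 := by omega
      rw [show b + ((h + 1 : Nat) : Int) + 1 = (b + (h : Int) + 1) + 1 by push_cast; ring,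
        PySem.List.pyRange_one_succ_right hle, List.foldl_append, ih, List.foldl_cons,
        List.foldl_nil]
      push_cast
      omega

-- fold of a constant max over a nonempty list
theorem foldl_const_max (M c : Int) (x : Int) (t : List Int) :
    (x :: t).foldl (fun acc (_ : Int) => max acc M) c = max c M := by
  induction t generalizing c x with
  | nil => rfl
  | cons y t ih => simpa [List.foldl_cons, max_assoc] using ih (max c M) y

-- running max of a segment's points starting from c
theorem seg_max (s : (Int × Int) × (Int × Int)) (c : Int) :
    (pvSegA s).foldl (fun a q => max a q.2) c = max c (max s.1.2 s.2.2) := by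
  obtain ⟨⟨x1, y1⟩, ⟨x2, y2⟩⟩ := s
  set h : Nat := (y1 - y2).natAbs with hh
  unfold pvSegA
  simp only [List.foldl_flatMap, List.foldl_map]
  have hinner : ∀ c' : Int, (PySem.List.pyRange (min y1 y2) (max y1 y2 + 1) 1).foldl
      (fun (a y : Int) => max a y) c' = max c' (max y1 y2) := by
    intro c'
    rw [show max y1 y2 + 1 = min y1 y2 + (h : Int) + 1 by omega, foldl_max_range,
      show min y1 y2 + (h : Int) = max y1 y2 by omega]
  have hx : min x1 x2 < max x1 x2 + 1 := by omega
  rw [PySem.List.pyRange_one_cons hx]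
  calc (min x1 x2 :: PySem.List.pyRange (min x1 x2 + 1) (max x1 x2 + 1) 1).foldl
        (fun acc x => (PySem.List.pyRange (min y1 y2) (max y1 y2 + 1) 1).foldl
          (fun a y => max a y) acc) c
      = (min x1 x2 :: PySem.List.pyRange (min x1 x2 + 1) (max x1 x2 + 1) 1).foldl
          (fun acc (_ : Int) => max acc (max y1 y2)) c := by
        exact PySem.List.foldl_congr_mem _ _ _ _ (fun acc x _ => hinner acc)
    _ = max c (max y1 y2) := foldl_const_max _ _ _ _

-- ===== VERDICT (by name: the statement is the Claim_ definition above) =====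
theorem create_rock_set_spec : Claim_equal_create_rock_set := by
  intro input _
  unfold Spec_create_rock_set
  rw [create_rock_set_eq_foldl_pts, foldl_pair_split]
  unfold create_rock_set_alt
  simp only [PySem.List.max?_id_cons, Option.getD_some]
  rw [Prod.mk.injEq]
  constructor
  · -- set components
    unfold pvPts
    rw [List.foldl_flatMap]
    refine PySem.List.foldl_congr_mem _ _ _ _ (fun r s _ => ?_)
    rw [← segB_eq_segA s]
    simp [pvSegB, List.foldl_map]
  · -- max components
    unfold pvPts
    rw [List.foldl_flatMap, List.foldl_map]
    exact PySem.List.foldl_congr_mem _ _ _ _ (fun a s _ => seg_max s a)
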